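-- pv_equiv track=rewrite | github.com/jggrimesdc-zz/netscan-components | src/scan/batch/email_update.py | pass_simple_mask
-- ===== SOURCE A (Python) =====
-- import string
--
-- def pass_simple_mask(pass_value):
--     if pass_value == 'unknown-password':
--         return 'unknown-password'
--     else:
--         simple_mask = []
--
--         for letter in pass_value:
--             if letter in string.digits:
--                 if not simple_mask or not simple_mask[-1] == 'digit':
--                     simple_mask.append('digit')
--             elif letter in string.ascii_lowercase:
--                 if not simple_mask or not simple_mask[-1] == 'string':
--                     simple_mask.append('string')
--             elif letter in string.ascii_uppercase:
--                 if not simple_mask or not simple_mask[-1] == 'string':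
--                     simple_mask.append('string')
--             else:
--                 if not simple_mask or not simple_mask[-1] == 'special':
--                     simple_mask.append('special')
--
--         simplemask_string = ''.join(simple_mask) if len(simple_mask) <= 3 else 'othermask'
--         return simplemask_string
-- ===== SOURCE B (Python) =====
-- import string
--
--
-- def _cls(c):
--     if c in string.digits:
--         return 'digit'
--     if c in string.ascii_letters:
--         return 'string'
--     return 'special'
--
--
-- def pass_simple_mask(pass_value):
--     if pass_value == 'unknown-password':
--         return 'unknown-password'
--     if not pass_value:
--         return ''
--     # one label per run: the first char's class, plus the class at each
--     # boundary where the class of adjacent characters changes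
--     groups = [_cls(pass_value[0])] + [_cls(b) for a, b in zip(pass_value, pass_value[1:])
--                                       if _cls(a) != _cls(b)]
--     if len(groups) > 3:
--         return 'othermask'
--     return ''.join(groups)
-- ===== Notes on version B (the rewrite author's own statement) =====
-- stated objective: alternative
-- what changed: B never collapses runs with an accumulator: it zips the string with its own tail and keeps the class label of the first character plus one label per adjacent pair whose classes differ (boundary detection), then applies the same <=3/join rule.
import Mathlib
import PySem

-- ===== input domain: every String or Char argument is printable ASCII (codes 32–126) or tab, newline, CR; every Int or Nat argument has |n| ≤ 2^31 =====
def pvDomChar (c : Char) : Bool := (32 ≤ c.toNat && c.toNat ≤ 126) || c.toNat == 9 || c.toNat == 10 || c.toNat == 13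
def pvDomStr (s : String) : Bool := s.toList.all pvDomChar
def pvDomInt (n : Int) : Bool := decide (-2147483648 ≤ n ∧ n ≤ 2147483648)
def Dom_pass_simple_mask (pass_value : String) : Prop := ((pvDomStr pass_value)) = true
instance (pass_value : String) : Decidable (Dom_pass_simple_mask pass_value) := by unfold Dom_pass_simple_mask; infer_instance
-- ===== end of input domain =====

-- B replaces A's stateful run-collapse (append unless the accumulator's last
-- label matches) by boundary detection over adjacent character pairs (zip with
-- the tail); objective: alternative decomposition, same cost.

-- ===== PORT A =====
def pvDigits : List Char := "0123456789".toList
def pvLower : List Char := "abcdefghijklmnopqrstuvwxyz".toList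
def pvUpper : List Char := "ABCDEFGHIJKLMNOPQRSTUVWXYZ".toList

-- one iteration of A's for-loop body
def passStepA (simple_mask : List String) (letter : Char) : List String :=
  if letter ∈ pvDigits then
    if simple_mask = [] ∨ ¬ (simple_mask.getLast? = some "digit") then simple_mask ++ ["digit"] else simple_mask
  else if letter ∈ pvLower then
    if simple_mask = [] ∨ ¬ (simple_mask.getLast? = some "string") then simple_mask ++ ["string"] else simple_mask
  else if letter ∈ pvUpper then
    if simple_mask = [] ∨ ¬ (simple_mask.getLast? = some "string") then simple_mask ++ ["string"] else simple_mask
  else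
    if simple_mask = [] ∨ ¬ (simple_mask.getLast? = some "special") then simple_mask ++ ["special"] else simple_mask

def pass_simple_mask (pass_value : String) : String :=
  if pass_value = "unknown-password" then "unknown-password"
  else
    let simple_mask := pass_value.toList.foldl passStepA []
    if simple_mask.length ≤ 3 then String.join simple_mask else "othermask"

-- ===== PORT B =====
def pvLettersB : List Char := ("abcdefghijklmnopqrstuvwxyz" ++ "ABCDEFGHIJKLMNOPQRSTUVWXYZ" : String).toList

def clsB (c : Char) : String :=
  if c ∈ pvDigits then "digit" else if c ∈ pvLettersB then "string" else "special"

-- the per-run labels: the first character's class, plus the class of the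
-- right-hand side of every adjacent pair whose classes differ
def maskGroups (c : Char) (rest : List Char) : List String :=
  clsB c :: (((c :: rest).zip rest).filter (fun p => ¬ clsB p.1 = clsB p.2)).map (fun p => clsB p.2)

def pass_simple_mask_alt (pass_value : String) : String :=
  if pass_value = "unknown-password" then "unknown-password"
  else
    match pass_value.toList with
    | [] => ""
    | c :: rest =>
      if (maskGroups c rest).length > 3 then "othermask"
      else String.join (maskGroups c rest)

-- ===== PRECONDITION & SPEC =====
def Spec_pass_simple_mask (pass_value : String) (out : String) : Prop := out = pass_simple_mask_alt pass_value
instance (pass_value : String) (out : String) : Decidable (Spec_pass_simple_mask pass_value out) := by unfold Spec_pass_simple_mask; infer_instance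

-- ===== CLAIM (what is proved, stated in full; the proofs are below) =====
def Claim_equal_pass_simple_mask : Prop := ∀ (pass_value : String), Dom_pass_simple_mask pass_value → Spec_pass_simple_mask pass_value (pass_simple_mask pass_value)

-- ===== LEMMAS AND PROOFS =====

-- A's "append unless last is already this label" guard, in normalised form
theorem appendIf_eq (acc : List String) (L : String) :
    (if acc = [] ∨ ¬ (acc.getLast? = some L) then acc ++ [L] else acc)
    = (if acc.getLast? = some L then acc else acc ++ [L]) := by
  rcases acc with _ | ⟨a, as⟩
  · simp
  · by_cases h : ((a :: as).getLast? = some L) <;> simp [h]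

theorem pvLettersB_eq : pvLettersB = pvLower ++ pvUpper := by
  simp [pvLettersB, pvLower, pvUpper]

theorem stepA_eq (acc : List String) (c : Char) :
    passStepA acc c
    = (if acc.getLast? = some (clsB c) then acc else acc ++ [clsB c]) := by
  unfold passStepA clsB
  by_cases hd : c ∈ pvDigits
  · simp [hd, appendIf_eq]
  · by_cases hl : c ∈ pvLower
    · have hL : c ∈ pvLettersB := by
        rw [pvLettersB_eq]; exact List.mem_append.mpr (Or.inl hl)
      simp [hd, hl, hL, appendIf_eq]
    · by_cases hu : c ∈ pvUpper
      · have hL : c ∈ pvLettersB := by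
          rw [pvLettersB_eq]; exact List.mem_append.mpr (Or.inr hu)
        simp [hd, hl, hu, hL, appendIf_eq]
      · have hL : c ∉ pvLettersB := by
          rw [pvLettersB_eq]
          intro h
          rcases List.mem_append.mp h with h' | h' <;> [exact hl h'; exact hu h']
        simp [hd, hl, hu, hL, appendIf_eq]

-- collapse of a label list, remembering the previous emitted label
def collapseFrom (p : Option String) : List String → List String
  | [] => []
  | x :: xs => if some x = p then collapseFrom p xs else x :: collapseFrom (some x) xs

theorem foldl_step_eq (l : List String) :
    ∀ acc : List String,
      l.foldl (fun a x => if a.getLast? = some x then a else a ++ [x]) acc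
      = acc ++ collapseFrom acc.getLast? l := by
  induction l with
  | nil => intro acc; simp [collapseFrom]
  | cons x xs ih =>
    intro acc
    by_cases h : acc.getLast? = some x
    · simp [List.foldl_cons, h, ih, collapseFrom]
    · have hlast : (acc ++ [x]).getLast? = some x := by simp
      simp only [List.foldl_cons, if_neg h, ih, hlast, collapseFrom]
      have : ¬ (some x = acc.getLast?) := fun hh => h hh.symm
      simp [this, List.append_assoc]

-- the collapse, continued after a character of class (clsB x), is exactly the
-- boundary labels of the adjacent pairs starting at x
theorem collapseFrom_eq_boundaries :
    ∀ (xs : List Char) (x : Char),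
      collapseFrom (some (clsB x)) (xs.map clsB)
      = (((x :: xs).zip xs).filter (fun p => ¬ clsB p.1 = clsB p.2)).map (fun p => clsB p.2) := by
  intro xs
  induction xs with
  | nil => intro x; simp [collapseFrom]
  | cons y ys ih =>
    intro x
    have hz : (x :: y :: ys).zip (y :: ys) = (x, y) :: (y :: ys).zip ys := rfl
    by_cases h : clsB y = clsB x
    · have e1 : collapseFrom (some (clsB x)) ((y :: ys).map clsB)
          = collapseFrom (some (clsB y)) (ys.map clsB) := by
        simp [collapseFrom, h]
      rw [e1, ih y, hz, List.filter_cons]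
      simp [h.symm]
    · have h' : ¬ clsB x = clsB y := fun hh => h hh.symm
      have e1 : collapseFrom (some (clsB x)) ((y :: ys).map clsB)
          = clsB y :: collapseFrom (some (clsB y)) (ys.map clsB) := by
        simp [collapseFrom, h]
      rw [e1, ih y, hz, List.filter_cons]
      simp [h']

theorem loop_eq_boundaries (c : Char) (rest : List Char) :
    (c :: rest).foldl passStepA [] = maskGroups c rest := by
  have hstep : passStepA
      = (fun a x => if a.getLast? = some (clsB x) then a else a ++ [clsB x]) :=
    funext fun a => funext fun x => stepA_eq a x
  have h2 := foldl_step_eq ((c :: rest).map clsB) []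
  rw [List.foldl_map] at h2
  rw [hstep, h2]
  simp only [List.nil_append, List.getLast?_nil, List.map_cons, collapseFrom, maskGroups]
  simp [collapseFrom_eq_boundaries rest c]

-- ===== VERDICT (by name: the statement is the Claim_ definition above) =====
theorem pass_simple_mask_spec : Claim_equal_pass_simple_mask := by
  intro pass_value _
  unfold Spec_pass_simple_mask pass_simple_mask pass_simple_mask_alt
  by_cases h : pass_value = "unknown-password"
  · simp [h]
  · simp only [if_neg h]
    rcases hcs : pass_value.toList with _ | ⟨c, rest⟩
    · simp [String.join]
    · have hm : (match c :: rest with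
          | [] => ""
          | c :: rest =>
            if (maskGroups c rest).length > 3 then "othermask"
            else String.join (maskGroups c rest))
          = if (maskGroups c rest).length > 3 then "othermask"
            else String.join (maskGroups c rest) := rfl
      rw [loop_eq_boundaries, hm]
      by_cases hg : (maskGroups c rest).length ≤ 3
      · rw [if_pos hg, if_neg (by omega)]
      · rw [if_neg hg, if_pos (by omega)]
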